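-- pv_equiv track=rewrite | github.com/agencyenterprise/endogenous-steering-resistance | experiment_06_sequential_activations/__init__.py | find_correction_position
-- ===== SOURCE A (Python) =====
-- def find_correction_position(token_strings: list[str], response_start: int) -> int | None:
--     """Find the position where self-correction starts in the response."""
--     text_so_far = ""
--     correction_phrases = ["I made a mistake", "I must correct myself", "I apologize"]
--     for i in range(response_start, len(token_strings)):
--         text_so_far += token_strings[i]
--         for phrase in correction_phrases:
--             if phrase in text_so_far:
--                 return i - 5  # Go back a bit to mark the start of the correction
--     return None
-- ===== SOURCE B (Python) =====
-- def find_correction_position(token_strings, response_start):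
--     """Find the position where self-correction starts in the response.
--
--     Single-pass version: join the scanned tokens once, locate the earliest
--     end of any correction phrase in the joined text, then map that character
--     position back to a token index with one cumulative-length scan.
--     """
--     correction_phrases = ["I made a mistake", "I must correct myself", "I apologize"]
--     n = len(token_strings)
--     full = "".join(token_strings[i] for i in range(response_start, n))
--     end = None
--     for phrase in correction_phrases:
--         p = full.find(phrase)
--         if p != -1:
--             e = p + len(phrase)
--             if end is None or e < end:
--                 end = e
--     if end is None:
--         return None
--     cum = 0
--     for i in range(response_start, n):
--         cum += len(token_strings[i])
--         if cum >= end: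
--             return i - 5
--     return None
-- ===== Notes on version B (the rewrite author's own statement) =====
-- stated objective: faster
-- what changed: Instead of re-searching the growing accumulated text for every phrase at every token (quadratic in text length), B joins the scanned tokens once, finds the earliest end of any correction phrase in the joined text with one search per phrase, and maps that character position back to the token index by a single cumulative-length scan.
import Mathlib
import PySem

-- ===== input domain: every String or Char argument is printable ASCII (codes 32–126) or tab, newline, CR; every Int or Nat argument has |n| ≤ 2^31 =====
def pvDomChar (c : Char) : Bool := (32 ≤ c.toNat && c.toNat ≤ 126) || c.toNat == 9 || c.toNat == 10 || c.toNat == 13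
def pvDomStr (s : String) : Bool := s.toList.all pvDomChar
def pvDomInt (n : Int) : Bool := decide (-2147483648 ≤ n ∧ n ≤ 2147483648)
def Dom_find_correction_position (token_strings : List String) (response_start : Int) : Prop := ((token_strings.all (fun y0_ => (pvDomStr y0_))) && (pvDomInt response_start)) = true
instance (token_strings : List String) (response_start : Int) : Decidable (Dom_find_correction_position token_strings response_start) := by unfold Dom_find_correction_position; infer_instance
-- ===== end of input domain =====

-- B joins the scanned tokens once, finds the earliest end of any correction phrase with one
-- search per phrase, and maps it back to a token index by a cumulative-length scan, instead of
-- A's re-search of the whole accumulated text at every token (objective: faster).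

-- The three correction phrases (shared literal data of both programs)
def fcpPhrases : List (List Char) :=
  ["I made a mistake".toList, "I must correct myself".toList, "I apologize".toList]

-- token_strings[i] (Python indexing; "" stands for the IndexError case, excluded by Pre_)
def fcpTok (token_strings : List String) (i : Int) : List Char :=
  ((PySem.List.pyGet? token_strings i).getD "").toList

-- ===== PORT A =====
-- the for-loop of A: text_so_far accumulates, early return on the first phrase hit
def fcpLoopA (ts : List String) (idxs : List Int) (text : List Char) : Option Int :=
  match idxs with
  | [] => none
  | i :: rest =>
    let text' := text ++ fcpTok ts i
    if fcpPhrases.any (fun ph => PySem.Chars.isIn ph text') then some (i - 5)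
    else fcpLoopA ts rest text'

def find_correction_position (token_strings : List String) (response_start : Int) : Option Int :=
  fcpLoopA token_strings (PySem.List.pyRange response_start token_strings.length 1) []

-- ===== PORT B =====
-- body of B's 'for phrase in correction_phrases' loop computing the minimal match end
def fcpStep (full : List Char) (acc : Option Int) (ph : List Char) : Option Int :=
  let p := PySem.Chars.find full ph
  if p ≠ -1 then
    let e := p + (ph.length : Int)
    match acc with
    | none => some e
    | some m => if e < m then some e else some m
  else acc

def fcpMinEnd (full : List Char) : Option Int := fcpPhrases.foldl (fcpStep full) none

-- B's cumulative-length scan mapping the character position back to a token index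
def fcpScan (ts : List String) (idxs : List Int) (cum e : Int) : Option Int :=
  match idxs with
  | [] => none
  | i :: rest =>
    let cum' := cum + ((fcpTok ts i).length : Int)
    if e ≤ cum' then some (i - 5) else fcpScan ts rest cum' e

def find_correction_position_alt (token_strings : List String) (response_start : Int) : Option Int :=
  let idxs := PySem.List.pyRange response_start token_strings.length 1
  let full := (idxs.map (fcpTok token_strings)).flatten
  match fcpMinEnd full with
  | none => none
  | some e => fcpScan token_strings idxs 0 e

-- ===== PRECONDITION & SPEC =====
-- A raises IndexError exactly when response_start < -len(token_strings) (the first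
-- token_strings[i] is then out of range); Pre_ excludes exactly those inputs.
def Pre_find_correction_position (token_strings : List String) (response_start : Int) : Prop :=
  -(token_strings.length : Int) ≤ response_start
instance (token_strings : List String) (response_start : Int) : Decidable (Pre_find_correction_position token_strings response_start) := by unfold Pre_find_correction_position; infer_instance

def pvWitness_find_correction_position : List String × Int := (["ok, ", "I apolo", "gize."], 0)

def Spec_find_correction_position (token_strings : List String) (response_start : Int) (out : Option Int) : Prop := out = find_correction_position_alt token_strings response_start
instance (token_strings : List String) (response_start : Int) (out : Option Int) : Decidable (Spec_find_correction_position token_strings response_start out) := by unfold Spec_find_correction_position; infer_instance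

-- ===== CLAIM (what is proved, stated in full; the proofs are below) =====
def Claim_equal_find_correction_position : Prop := ∀ (token_strings : List String) (response_start : Int), Dom_find_correction_position token_strings response_start → Pre_find_correction_position token_strings response_start → Spec_find_correction_position token_strings response_start (find_correction_position token_strings response_start)

-- ===== LEMMAS AND PROOFS =====

-- a phrase occurs in the length-L prefix of full iff its first occurrence in full ends by L
lemma fcp_infix_take_iff (full ph : List Char) (L : Nat) :
    ph <:+: full.take L ↔
      0 ≤ PySem.Chars.find full ph ∧ PySem.Chars.find full ph + (ph.length : Int) ≤ (L : Int) := by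
  constructor
  · rintro ⟨s, t, hst⟩
    have hpre : ph <+: (full.take L).drop s.length := by
      rw [← hst]; simp
    rw [List.drop_take] at hpre
    have hpre2 : ph <+: full.drop s.length ∧ ph.length ≤ L - s.length :=
      List.prefix_take_iff.mp hpre
    have hsL : s.length + ph.length ≤ L := by
      have hlen : s.length + ph.length + t.length = (full.take L).length := by
        rw [← hst]; simp [Nat.add_assoc]
      have ht : (full.take L).length ≤ L := by
        simp [List.length_take]
      omega
    have hinfix : ph <:+: full := hpre2.1.isInfix.trans (List.drop_suffix _ _).isInfix
    have h0 : 0 ≤ PySem.Chars.find full ph := (PySem.Chars.find_nonneg_iff full ph).mpr hinfix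
    have hspec := PySem.Chars.find_spec (s := full) (sub := ph) h0
    have hj : (PySem.Chars.find full ph).toNat ≤ s.length := by
      by_contra hlt
      exact hspec.2 s.length (by omega) hpre2.1
    refine ⟨h0, ?_⟩
    have := Int.toNat_of_nonneg h0
    omega
  · rintro ⟨h0, hle⟩
    have hspec := PySem.Chars.find_spec (s := full) (sub := ph) h0
    set p := (PySem.Chars.find full ph).toNat with hp
    have hpL : p + ph.length ≤ L := by
      have := Int.toNat_of_nonneg h0
      omega
    have h1 : ph <+: (full.drop p).take (L - p) :=
      List.prefix_take_iff.mpr ⟨hspec.1, by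
        have := hspec.1.length_le
        omega⟩
    rw [← List.drop_take] at h1
    exact h1.isInfix.trans (List.drop_suffix _ _).isInfix

-- the fold of fcpStep characterises "some scanned phrase fits inside the length-L prefix"
lemma fcp_fold_char (full : List Char) : ∀ (phs : List (List Char)) (acc : Option Int)
    (P0 : Nat → Prop), (∀ L : Nat, P0 L ↔ ∃ e, acc = some e ∧ e ≤ (L : Int)) → ∀ L : Nat,
    ((P0 L ∨ ∃ ph ∈ phs, ph <:+: full.take L) ↔
      ∃ e, phs.foldl (fcpStep full) acc = some e ∧ e ≤ (L : Int)) := by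
  intro phs
  induction phs with
  | nil =>
    intro acc P0 h L
    simpa using h L
  | cons ph rest ih =>
    intro acc P0 h L
    have hstep : ∀ L : Nat, (P0 L ∨ ph <:+: full.take L) ↔
        ∃ e, fcpStep full acc ph = some e ∧ e ≤ (L : Int) := by
      intro L'
      rw [fcp_infix_take_iff, h L']
      have hge : -1 ≤ PySem.Chars.find full ph := PySem.Chars.neg_one_le_find full ph
      unfold fcpStep
      by_cases hf : PySem.Chars.find full ph = -1
      · simp [hf]
      · simp only [hf, ne_eq, not_false_eq_true, if_pos]
        cases acc with
        | none => simp; omega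
        | some m =>
          by_cases hlt : PySem.Chars.find full ph + (ph.length : Int) < m <;>
            simp [hlt] <;> omega
    have := ih (fcpStep full acc ph) (fun L' => P0 L' ∨ ph <:+: full.take L') hstep L
    rw [List.foldl_cons]
    rw [← this]
    constructor
    · rintro (h0 | ⟨q, hq, hinf⟩)
      · exact Or.inl (Or.inl h0)
      · rcases List.mem_cons.mp hq with rfl | hq'
        · exact Or.inl (Or.inr hinf)
        · exact Or.inr ⟨q, hq', hinf⟩
    · rintro ((h0 | h1) | ⟨q, hq, hinf⟩)
      · exact Or.inl h0
      · exact Or.inr ⟨ph, List.mem_cons_self .., h1⟩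
      · exact Or.inr ⟨q, List.mem_cons_of_mem _ hq, hinf⟩

lemma fcp_minEnd_char (full : List Char) (L : Nat) :
    (∃ ph ∈ fcpPhrases, ph <:+: full.take L) ↔
      ∃ e, fcpMinEnd full = some e ∧ e ≤ (L : Int) := by
  have h := fcp_fold_char full fcpPhrases none (fun _ => False) (by simp) L
  simpa [fcpMinEnd] using h

lemma fcp_loopA_cons (ts : List String) (i : Int) (rest : List Int) (text : List Char) :
    fcpLoopA ts (i :: rest) text =
      (if fcpPhrases.any (fun ph => PySem.Chars.isIn ph (text ++ fcpTok ts i)) then some (i - 5)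
       else fcpLoopA ts rest (text ++ fcpTok ts i)) := rfl

lemma fcp_scan_cons (ts : List String) (i : Int) (rest : List Int) (cum e : Int) :
    fcpScan ts (i :: rest) cum e =
      (if e ≤ cum + ((fcpTok ts i).length : Int) then some (i - 5)
       else fcpScan ts rest (cum + ((fcpTok ts i).length : Int)) e) := rfl

-- main loop equivalence: A's scan equals B's threshold scan against the total joined text
lemma fcp_loop_eq (ts : List String) : ∀ (idxs : List Int) (pre : List Char),
    (∀ ph ∈ fcpPhrases, ¬ ph <:+: pre) →
    fcpLoopA ts idxs pre =
      (match fcpMinEnd (pre ++ (idxs.map (fcpTok ts)).flatten) with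
       | none => none
       | some e => fcpScan ts idxs (pre.length : Int) e) := by
  intro idxs
  induction idxs with
  | nil =>
    intro pre _
    cases h : fcpMinEnd (pre ++ ([].map (fcpTok ts)).flatten) <;> simp [fcpLoopA, fcpScan]
  | cons i rest ih =>
    intro pre hpre
    have htotal : pre ++ ((i :: rest).map (fcpTok ts)).flatten
        = (pre ++ fcpTok ts i) ++ (rest.map (fcpTok ts)).flatten := by
      simp [List.append_assoc]
    have hpref : ((pre ++ fcpTok ts i) ++ (rest.map (fcpTok ts)).flatten).take
        (pre ++ fcpTok ts i).length = pre ++ fcpTok ts i := List.take_left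
    have hchar := fcp_minEnd_char ((pre ++ fcpTok ts i) ++ (rest.map (fcpTok ts)).flatten)
      (pre ++ fcpTok ts i).length
    rw [hpref] at hchar
    have hcum : (pre.length : Int) + ((fcpTok ts i).length : Int)
        = ((pre ++ fcpTok ts i).length : Int) := by
      push_cast [List.length_append]; ring
    rw [htotal, fcp_loopA_cons]
    by_cases hA : (fcpPhrases.any (fun ph => PySem.Chars.isIn ph (pre ++ fcpTok ts i))) = true
    · have hex : ∃ ph ∈ fcpPhrases, ph <:+: (pre ++ fcpTok ts i) := by
        rcases List.any_eq_true.mp hA with ⟨ph, hph, hin⟩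
        exact ⟨ph, hph, (PySem.Chars.isIn_iff_infix ph _).mp hin⟩
      rcases hchar.mp hex with ⟨e, hsome, hle⟩
      rw [hsome, if_pos hA]
      show some (i - 5) = fcpScan ts (i :: rest) (pre.length : Int) e
      rw [fcp_scan_cons, hcum, if_pos hle]
    · have hnotex : ¬ ∃ ph ∈ fcpPhrases, ph <:+: (pre ++ fcpTok ts i) := by
        rintro ⟨ph, hph, hinf⟩
        exact hA (List.any_eq_true.mpr ⟨ph, hph, (PySem.Chars.isIn_iff_infix ph _).mpr hinf⟩)
      have hpre2 : ∀ ph ∈ fcpPhrases, ¬ ph <:+: (pre ++ fcpTok ts i) := by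
        intro ph hph hinf; exact hnotex ⟨ph, hph, hinf⟩
      rw [if_neg hA, ih (pre ++ fcpTok ts i) hpre2]
      cases hm : fcpMinEnd ((pre ++ fcpTok ts i) ++ (rest.map (fcpTok ts)).flatten) with
      | none => rfl
      | some e =>
        have hnotle : ¬ e ≤ ((pre ++ fcpTok ts i).length : Int) := by
          intro hle
          exact hnotex (hchar.mpr ⟨e, hm, hle⟩)
        show fcpScan ts rest ((pre ++ fcpTok ts i).length : Int) e
          = fcpScan ts (i :: rest) (pre.length : Int) e
        rw [fcp_scan_cons, hcum, if_neg hnotle]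

-- ===== VERDICT (by name: the statement is the Claim_ definition above) =====
theorem find_correction_position_spec : Claim_equal_find_correction_position := by
  intro ts rs _ _
  unfold Spec_find_correction_position
  have h := fcp_loop_eq ts (PySem.List.pyRange rs ts.length 1) [] (by decide)
  simpa [find_correction_position, find_correction_position_alt] using h
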